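-- pv_equiv track=rewrite | github.com/trilinos/Trilinos | packages/PyTrilinos2/scripts/gather_ETI.py | get_list_of_ETI_files_to_include
-- ===== SOURCE A (Python) =====
-- def get_list_of_ETI_files_to_include(list_all_ETI_files, list_all_classes_to_ETI):
--     list_ETI_files = []
--     for ETI_file in list_all_ETI_files:
--         for ETI_class in list_all_classes_to_ETI:
--             if ETI_file.startswith(ETI_class):
--                 list_ETI_files.append(ETI_file)
--                 break
--     return list_ETI_files
-- ===== SOURCE B (Python) =====
-- def get_list_of_ETI_files_to_include(list_all_ETI_files, list_all_classes_to_ETI):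
--     class_set = set(list_all_classes_to_ETI)
--     return [ETI_file for ETI_file in list_all_ETI_files
--             if any(ETI_file[:k] in class_set for k in range(len(ETI_file) + 1))]
-- ===== Notes on version B (the rewrite author's own statement) =====
-- stated objective: faster
-- what changed: A scans the class list per file with startswith and a break; B builds a hash set of the class names once and keeps a file iff one of its own prefixes is in the set, so the per-file scan over the M classes disappears.
import Mathlib
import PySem

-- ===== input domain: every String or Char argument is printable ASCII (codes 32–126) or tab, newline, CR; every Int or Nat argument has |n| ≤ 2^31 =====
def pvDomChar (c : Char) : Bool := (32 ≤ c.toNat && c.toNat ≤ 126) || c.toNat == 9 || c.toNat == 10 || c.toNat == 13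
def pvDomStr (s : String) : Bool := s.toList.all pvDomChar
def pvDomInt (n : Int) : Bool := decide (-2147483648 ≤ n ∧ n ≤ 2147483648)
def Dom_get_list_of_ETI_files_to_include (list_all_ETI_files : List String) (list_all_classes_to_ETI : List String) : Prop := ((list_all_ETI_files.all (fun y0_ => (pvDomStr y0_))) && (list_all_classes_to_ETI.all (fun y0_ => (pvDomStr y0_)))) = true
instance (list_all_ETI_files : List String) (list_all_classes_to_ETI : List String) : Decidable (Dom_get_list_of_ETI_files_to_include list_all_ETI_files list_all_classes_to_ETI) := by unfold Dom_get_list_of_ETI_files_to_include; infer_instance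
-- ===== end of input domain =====

-- B replaces A's per-file scan over the class list by a set of class names queried with each
-- prefix of the file name (objective: alternative algorithm, same observable behaviour).

-- ===== PORT A =====
-- inner 'for ETI_class in …: if ETI_file.startswith(ETI_class): …; break'
def pvAScan (f : String) : List String → Bool
  | [] => false
  | c :: rest => if PySem.Str.startswith f c then true else pvAScan f rest

def get_list_of_ETI_files_to_include (list_all_ETI_files : List String) (list_all_classes_to_ETI : List String) : List String :=
  list_all_ETI_files.foldl
    (fun list_ETI_files ETI_file =>
      if pvAScan ETI_file list_all_classes_to_ETI then list_ETI_files ++ [ETI_file] else list_ETI_files)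
    []

-- ===== PORT B =====
def get_list_of_ETI_files_to_include_alt (list_all_ETI_files : List String) (list_all_classes_to_ETI : List String) : List String :=
  let class_set : PySem.Set String := PySem.Set.ofList list_all_classes_to_ETI
  list_all_ETI_files.filter
    (fun ETI_file =>
      (PySem.List.pyRange 0 ((PySem.Str.len ETI_file : Int) + 1) 1).any
        (fun k => PySem.Set.contains class_set (PySem.Str.slice ETI_file none (some k))))

-- ===== PRECONDITION & SPEC =====
def Spec_get_list_of_ETI_files_to_include (list_all_ETI_files : List String) (list_all_classes_to_ETI : List String) (out : List String) : Prop := out = get_list_of_ETI_files_to_include_alt list_all_ETI_files list_all_classes_to_ETI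
instance (list_all_ETI_files : List String) (list_all_classes_to_ETI : List String) (out : List String) : Decidable (Spec_get_list_of_ETI_files_to_include list_all_ETI_files list_all_classes_to_ETI out) := by unfold Spec_get_list_of_ETI_files_to_include; infer_instance

-- ===== CLAIM (what is proved, stated in full; the proofs are below) =====
def Claim_equal_get_list_of_ETI_files_to_include : Prop := ∀ (list_all_ETI_files : List String) (list_all_classes_to_ETI : List String), Dom_get_list_of_ETI_files_to_include list_all_ETI_files list_all_classes_to_ETI → Spec_get_list_of_ETI_files_to_include list_all_ETI_files list_all_classes_to_ETI (get_list_of_ETI_files_to_include list_all_ETI_files list_all_classes_to_ETI)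

-- ===== LEMMAS AND PROOFS =====

-- A's inner scan is an existence test over the class list.
theorem pvAScan_eq_true_iff (f : String) (cs : List String) :
    pvAScan f cs = true ↔ ∃ c ∈ cs, PySem.Str.startswith f c = true := by
  induction cs with
  | nil => simp [pvAScan]
  | cons c rest ih => by_cases h : PySem.Str.startswith f c = true <;> simp [pvAScan, ih]

-- The two per-file tests agree.
theorem pvPred_eq (f : String) (cs : List String) :
    pvAScan f cs =
      (PySem.List.pyRange 0 ((PySem.Str.len f : Int) + 1) 1).any
        (fun k => PySem.Set.contains (PySem.Set.ofList cs) (PySem.Str.slice f none (some k))) := by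
  rw [Bool.eq_iff_iff, pvAScan_eq_true_iff]
  simp only [List.any_eq_true, PySem.List.mem_pyRange_one, PySem.Set.contains_iff,
    PySem.Set.mem_ofList]
  constructor
  · rintro ⟨c, hc, hsw⟩
    rw [PySem.Str.startswith_eq, PySem.Chars.startswith_iff] at hsw
    refine ⟨(c.length : Int), ⟨by positivity, ?_⟩, ?_⟩
    · have h := hsw.length_le
      simp only [String.length_toList] at h
      simp [PySem.Str.len_eq]
      omega
    · have hslice : (PySem.Str.slice f none (some (c.length : Int))).toList
          = f.toList.take c.length := by
        simp [PySem.Str.toList_slice, PySem.List.slice_to_natCast]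
      have htake : f.toList.take c.length = c.toList := by
        have := (List.prefix_iff_eq_take.mp hsw).symm
        simpa [String.length_toList] using this
      have heq : PySem.Str.slice f none (some (c.length : Int)) = c :=
        String.toList_inj.mp (hslice.trans htake)
      rwa [heq]
  · rintro ⟨k, ⟨hk0, hk⟩, hmem⟩
    refine ⟨PySem.Str.slice f none (some k), hmem, ?_⟩
    rw [PySem.Str.startswith_eq, PySem.Chars.startswith_iff]
    have : (PySem.Str.slice f none (some k)).toList = f.toList.take k.toNat := by
      simp [PySem.Str.toList_slice, PySem.List.slice_to _ hk0]
    rw [this]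
    exact List.take_prefix _ _

-- ===== VERDICT (by name: the statement is the Claim_ definition above) =====
theorem get_list_of_ETI_files_to_include_spec : Claim_equal_get_list_of_ETI_files_to_include := by
  intro files cs _
  unfold Spec_get_list_of_ETI_files_to_include
  unfold get_list_of_ETI_files_to_include get_list_of_ETI_files_to_include_alt
  rw [PySem.List.foldl_append_if]
  simp only [List.nil_append, List.map_id']
  exact List.filter_congr (fun f _ => (pvPred_eq f cs))
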